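-- pv_equiv track=rewrite | github.com/Yuan98Yu/solutions-to-leetcode-cn | solutions/[5982]解决智力问题.py | mostPoints
-- ===== SOURCE A (Python) =====
-- from typing import List
--
-- def mostPoints(questions: List[List[int]]) -> int:
--     n = len(questions)
--     memo = [0] * n
--     memo[-1] = questions[-1][0]
--
--     for i in range(n-2, -1, -1):
--         val, power = questions[i]
--         memo[i] = memo[i+power+1] + val if i+power+1 < n else val
--         memo[i] = max(memo[i+1], memo[i])
--
--     return max(memo)
-- ===== SOURCE B (Python) =====
-- from typing import List
--
-- def mostPoints(questions: List[List[int]]) -> int: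
--     # Forward push DP over the prefix questions[:-1]: dp[i] is the best score of a
--     # schedule contained in questions[:i] that leaves question i available; a taken
--     # question whose cooldown jumps past the end finishes a schedule (tracked in
--     # best), otherwise its score flows forward; the last question always finishes one.
--     n = len(questions)
--     dp = [0] * n
--     best = None
--     for i, (val, power) in enumerate(questions[:-1]):
--         nxt = i + power + 1
--         if nxt >= n:
--             cand = dp[i] + val
--             best = cand if best is None else max(best, cand)
--         else:
--             dp[nxt] = max(dp[nxt], dp[i] + val)
--         dp[i + 1] = max(dp[i + 1], dp[i])
--     cand = dp[n - 1] + questions[-1][0]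
--     return cand if best is None else max(best, cand)
-- ===== Notes on version B (the rewrite author's own statement) =====
-- stated objective: alternative
-- what changed: A's backward pull DP (memo filled right-to-left by reading memo[i+power+1], plus a final max() scan) is replaced by a forward push DP: scanning the questions left-to-right, each taken question pushes its accumulated score to the question its cooldown lands on, a cooldown that jumps past the end closes a schedule into a running best, and the last question closes the remaining one.
-- outside the precondition, e.g. on mostPoints([[7, -1], [3, 0]]): A returns 7, B returns 10
import Mathlib
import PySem

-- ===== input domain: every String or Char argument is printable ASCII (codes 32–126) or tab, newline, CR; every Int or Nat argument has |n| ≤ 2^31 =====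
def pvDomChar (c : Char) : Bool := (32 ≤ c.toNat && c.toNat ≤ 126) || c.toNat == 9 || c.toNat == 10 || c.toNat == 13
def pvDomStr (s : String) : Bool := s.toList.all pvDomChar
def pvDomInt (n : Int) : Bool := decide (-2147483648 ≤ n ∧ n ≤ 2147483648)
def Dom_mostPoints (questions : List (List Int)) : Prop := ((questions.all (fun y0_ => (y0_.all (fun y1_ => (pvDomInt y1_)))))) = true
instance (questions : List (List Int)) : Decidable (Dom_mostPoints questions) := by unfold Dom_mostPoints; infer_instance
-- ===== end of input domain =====

-- B replaces A's backward pull DP (memo filled right-to-left plus a final max scan) by a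
-- forward push DP over the prefix: scores flow left-to-right to the question each cooldown
-- lands on, schedules close into a running best (objective: alternative).


-- ===== PORT A =====
def mostPoints (questions : List (List Int)) : Int :=
  let n : Int := (questions.length : Int)
  let memo : List Int := List.replicate questions.length 0
  let memo := PySem.List.pySetD memo (-1)
    (PySem.List.pyGetD (PySem.List.pyGetD questions (-1) []) 0 0)
  let memo := (PySem.List.pyRange (n - 2) (-1) (-1)).foldl
    (fun memo i =>
      let q := PySem.List.pyGetD questions i []
      let val := PySem.List.pyGetD q 0 0
      let power := PySem.List.pyGetD q 1 0
      let memo := PySem.List.pySetD memo i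
        (if i + power + 1 < n then PySem.List.pyGetD memo (i + power + 1) 0 + val else val)
      PySem.List.pySetD memo i
        (max (PySem.List.pyGetD memo (i + 1) 0) (PySem.List.pyGetD memo i 0)))
    memo
  (PySem.List.max? memo (fun y => y)).getD 0

-- ===== PORT B =====
def mostPoints_alt (questions : List (List Int)) : Int :=
  let n : Int := (questions.length : Int)
  let dp : List Int := List.replicate questions.length 0
  let s := (PySem.List.enumerate (PySem.List.slice questions none (some (-1)))).foldl
    (fun s iq =>
      let val := PySem.List.pyGetD iq.2 0 0
      let power := PySem.List.pyGetD iq.2 1 0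
      let nxt := iq.1 + power + 1
      if n ≤ nxt then
        let cand := PySem.List.pyGetD s.1 iq.1 0 + val
        let best : Option Int := match s.2 with
          | none => some cand
          | some b => some (max b cand)
        (PySem.List.pySetD s.1 (iq.1 + 1)
          (max (PySem.List.pyGetD s.1 (iq.1 + 1) 0) (PySem.List.pyGetD s.1 iq.1 0)), best)
      else
        let dp := PySem.List.pySetD s.1 nxt
          (max (PySem.List.pyGetD s.1 nxt 0) (PySem.List.pyGetD s.1 iq.1 0 + val))
        (PySem.List.pySetD dp (iq.1 + 1)
          (max (PySem.List.pyGetD dp (iq.1 + 1) 0) (PySem.List.pyGetD dp iq.1 0)), s.2))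
    (dp, (none : Option Int))
  let cand := PySem.List.pyGetD s.1 (n - 1) 0 +
    PySem.List.pyGetD (PySem.List.pyGetD questions (-1) []) 0 0
  match s.2 with
  | none => cand
  | some b => max b cand

-- ===== PRECONDITION & SPEC =====
-- Pre_ excludes exactly: the empty list and an empty last question (A raises IndexError, B
-- raises IndexError too), a non-last question that is not a [points, brainpower] pair of
-- length 2 (both raise ValueError unpacking it), and a non-last question with negative
-- brainpower, where A's backward negative indexing into memo reads an accidental slot while
-- B's forward push writes to a wrapped slot — both values are accidents of list wraparound.
def Pre_mostPoints (questions : List (List Int)) : Prop :=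
  questions ≠ [] ∧ 1 ≤ (questions.getLast?.getD []).length ∧
    ∀ q ∈ questions.dropLast, q.length = 2 ∧ 0 ≤ q.getD 1 0
instance (questions : List (List Int)) : Decidable (Pre_mostPoints questions) := by
  unfold Pre_mostPoints; infer_instance
def pvWitness_mostPoints : List (List Int) := [[3, 2], [4, 3], [4, 4], [2, 5]]

def Spec_mostPoints (questions : List (List Int)) (out : Int) : Prop := out = mostPoints_alt questions
instance (questions : List (List Int)) (out : Int) : Decidable (Spec_mostPoints questions out) := by
  unfold Spec_mostPoints; infer_instance

-- ===== CLAIM (what is proved, stated in full; the proofs are below) =====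
def Claim_equal_mostPoints : Prop := ∀ (questions : List (List Int)), Dom_mostPoints questions → Pre_mostPoints questions → Spec_mostPoints questions (mostPoints questions)

-- ===== LEMMAS AND PROOFS =====

-- The list of suffix optima, in question order: (pvSuf qs)[i] = A's memo[i].
def pvSuf : List (List Int) → List Int
  | [] => []
  | q :: rest =>
    let m := pvSuf rest
    let take := q.getD 0 0 +
      (if q.getD 1 0 < (rest.length : Int) then m.getD (q.getD 1 0).toNat 0 else 0)
    (if m.isEmpty then take else max take (m.headD 0)) :: m

theorem pvSuf_length (qs : List (List Int)) : (pvSuf qs).length = qs.length := by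
  induction qs with
  | nil => rfl
  | cons q rest ih => simp [pvSuf, ih]

theorem pv_headD_eq_getD (l : List Int) : l.headD 0 = l.getD 0 0 := by
  cases l <;> simp

theorem pv_foldl_max_of_le (l : List Int) (a : Int) (h : ∀ y ∈ l, y ≤ a) :
    l.foldl max a = a := by
  induction l with
  | nil => rfl
  | cons x t ih =>
    have hx : x ≤ a := h x (by simp)
    simp only [List.foldl_cons, max_eq_left hx]
    exact ih (fun y hy => h y (by simp [hy]))

theorem pvSuf_getD (qs : List (List Int)) (t : Nat) (ht : t + 1 < qs.length)
    (hp : ∀ t' : Nat, t' + 1 < qs.length → 0 ≤ (qs.getD t' []).getD 1 0) :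
    (pvSuf qs).getD t 0 =
      max ((pvSuf qs).getD (t + 1) 0)
        (if (t : Int) + (qs.getD t []).getD 1 0 + 1 < (qs.length : Int)
         then (pvSuf qs).getD (t + ((qs.getD t []).getD 1 0).toNat + 1) 0 + (qs.getD t []).getD 0 0
         else (qs.getD t []).getD 0 0) := by
  induction qs generalizing t with
  | nil => simp at ht
  | cons q rest ih =>
    have hlen : (pvSuf rest).length = rest.length := pvSuf_length rest
    cases t with
    | zero =>
      have hrl : 0 < rest.length := by simp at ht; omega
      have hmne : pvSuf rest ≠ [] := List.ne_nil_of_length_pos (by omega)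
      have hme : (pvSuf rest).isEmpty = false := by simpa using hmne
      have hq : 0 ≤ q.getD 1 0 := by simpa using hp 0 (by simp at ht ⊢; omega)
      simp only [pvSuf, hme, List.getD_cons_zero, List.getD_cons_succ, Nat.zero_add,
        List.length_cons]
      rw [pv_headD_eq_getD]
      push_cast
      simp only [show ((0:Int) + q.getD 1 0 + 1 < (rest.length : Int) + 1) ↔
          (q.getD 1 0 < (rest.length : Int)) from by omega]
      by_cases hc : q.getD 1 0 < (rest.length : Int)
      · rw [if_pos hc, if_pos hc, max_comm, Int.add_comm]
      · rw [if_neg hc, if_neg hc, max_comm, Int.add_zero]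
    | succ t =>
      have ht' : t + 1 < rest.length := by simp at ht; omega
      have hq : 0 ≤ (rest.getD t []).getD 1 0 := by
        simpa using hp (t + 1) (by simp; omega)
      have hiff : (((t + 1 : Nat)) : Int) + (rest.getD t []).getD 1 0 + 1 < ((q :: rest).length : Int) ↔
          ((t : Nat) : Int) + (rest.getD t []).getD 1 0 + 1 < ((rest.length : Nat) : Int) := by
        simp only [List.length_cons]; push_cast; omega
      simp only [pvSuf, List.getD_cons_succ, hiff]
      have harith : t + 1 + ((rest.getD t []).getD 1 0).toNat = t + ((rest.getD t []).getD 1 0).toNat + 1 := by omega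
      rw [harith]
      exact ih t ht' (fun t' ht'2 => by simpa using hp (t' + 1) (by simp; omega))

theorem pvSuf_le_head (qs : List (List Int))
    (hp : ∀ t' : Nat, t' + 1 < qs.length → 0 ≤ (qs.getD t' []).getD 1 0) :
    ∀ j, j < qs.length → (pvSuf qs).getD j 0 ≤ (pvSuf qs).getD 0 0 := by
  intro j
  induction j with
  | zero => intro _; exact le_refl _
  | succ j ih =>
    intro hj
    have h1 : j + 1 < qs.length := hj
    have := pvSuf_getD qs j (by omega) hp
    calc (pvSuf qs).getD (j+1) 0 ≤ (pvSuf qs).getD j 0 := by rw [this]; exact le_max_left _ _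
      _ ≤ (pvSuf qs).getD 0 0 := ih (by omega)

theorem pvSuf_last (qs : List (List Int)) (h : qs ≠ []) :
    (pvSuf qs).drop (qs.length - 1) = [(qs.getLast h).getD 0 0] := by
  induction qs with
  | nil => exact absurd rfl h
  | cons q rest ih =>
    by_cases hre : rest = []
    · subst hre
      simp [pvSuf]
    · have hrl : 0 < rest.length := List.length_pos_of_ne_nil hre
      have hlast : (q :: rest).getLast h = rest.getLast hre := List.getLast_cons hre
      rw [hlast]
      have hd : (q :: rest).length - 1 = (rest.length - 1) + 1 := by simp; omega
      rw [hd]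
      simp only [pvSuf, List.drop_succ_cons]
      exact ih hre

def pvAStep (qs : List (List Int)) (memo : List Int) (i : Int) : List Int :=
  let q := PySem.List.pyGetD qs i []
  let val := PySem.List.pyGetD q 0 0
  let power := PySem.List.pyGetD q 1 0
  let memo := PySem.List.pySetD memo i
    (if i + power + 1 < (qs.length : Int) then PySem.List.pyGetD memo (i + power + 1) 0 + val else val)
  PySem.List.pySetD memo i
    (max (PySem.List.pyGetD memo (i + 1) 0) (PySem.List.pyGetD memo i 0))

theorem pv_rep_cons (t : Nat) (l : List Int) :
    List.replicate (t + 1) (0 : Int) ++ l = List.replicate t 0 ++ (0 :: l) := by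
  rw [List.replicate_succ', List.append_assoc, List.singleton_append]

theorem pv_pySetD_neg_one (xs : List Int) (v : Int) (h : xs ≠ []) :
    PySem.List.pySetD xs (-1) v = xs.set (xs.length - 1) v := by
  have hl : (1 : Int) ≤ xs.length := by
    have := List.length_pos_of_ne_nil h; omega
  simp [PySem.List.pySetD, PySem.List.pySet?, PySem.List.pyIdx?, hl]

theorem pv_pySetD_natCast (xs : List Int) (n : Nat) (v : Int) (h : n < xs.length) :
    PySem.List.pySetD xs (n : Int) v = xs.set n v := by
  simp [PySem.List.pySetD, PySem.List.pySet?_natCast _ _ _ h]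

theorem pv_getD_rep_drop (l : List Int) (t j : Nat) (ht : t ≤ j) (hj : j < l.length) :
    (List.replicate t (0 : Int) ++ l.drop t).getD j 0 = l.getD j 0 := by
  rw [List.getD_append_right _ _ _ _ (by simpa using ht)]
  rw [List.getD_eq_getElem _ _ (by simp; omega), List.getD_eq_getElem _ _ hj]
  simp only [List.getElem_drop]
  congr 1
  simp; omega

theorem pvAStep_inv (qs : List (List Int))
    (hp : ∀ t' : Nat, t' + 1 < qs.length → 0 ≤ (qs.getD t' []).getD 1 0)
    (t : Nat) (ht : t + 2 ≤ qs.length) :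
    pvAStep qs (List.replicate (t + 1) (0 : Int) ++ (pvSuf qs).drop (t + 1)) (t : Int) =
      List.replicate t (0 : Int) ++ (pvSuf qs).drop t := by
  have hl : (pvSuf qs).length = qs.length := pvSuf_length qs
  have hpw : 0 ≤ (qs.getD t []).getD 1 0 := hp t (by omega)
  simp only [pvAStep]
  rw [PySem.List.pyGetD_natCast, PySem.List.pyGetD_zero, PySem.List.pyGetD_ofNat']
  set l := pvSuf qs with hldef
  set p := (qs.getD t []).getD 1 0 with hpdef
  set v := (qs.getD t []).getD 0 0 with hvdef
  set dr := l.drop (t + 1) with hdrdef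
  have hstlen : (List.replicate (t + 1) (0 : Int) ++ dr).length = qs.length := by
    simp [hdrdef]; omega
  have hX : (if (t : Int) + p + 1 < (qs.length : Int)
        then PySem.List.pyGetD (List.replicate (t + 1) (0 : Int) ++ dr) ((t : Int) + p + 1) 0 + v else v)
      = (if (t : Int) + p + 1 < (qs.length : Int) then l.getD (t + p.toNat + 1) 0 + v else v) := by
    by_cases hc : (t : Int) + p + 1 < (qs.length : Int)
    · rw [if_pos hc, if_pos hc]
      congr 1
      have hcast : (t : Int) + p + 1 = ((t + p.toNat + 1 : Nat) : Int) := by push_cast; omega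
      rw [hcast, PySem.List.pyGetD_natCast, hdrdef]
      exact pv_getD_rep_drop l (t + 1) (t + p.toNat + 1) (by omega) (by omega)
    · rw [if_neg hc, if_neg hc]
  rw [hX]
  set X := if (t : Int) + p + 1 < (qs.length : Int) then l.getD (t + p.toNat + 1) 0 + v else v with hXdef
  rw [pv_pySetD_natCast (List.replicate (t + 1) (0 : Int) ++ dr) t X (by rw [hstlen]; omega)]
  rw [pv_rep_cons, List.set_append_right _ _ (by simp), List.length_replicate,
    Nat.sub_self, List.set_cons_zero]
  have hget1 : PySem.List.pyGetD (List.replicate t (0 : Int) ++ X :: dr) ((t : Int) + 1) 0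
      = l.getD (t + 1) 0 := by
    rw [show (t : Int) + 1 = ((t + 1 : Nat) : Int) from by push_cast; ring, PySem.List.pyGetD_natCast]
    rw [List.getD_append_right _ _ _ _ (by simp), List.length_replicate]
    simp only [Nat.add_sub_cancel_left, List.getD_cons_succ]
    rw [hdrdef, List.drop_eq_getElem_cons (by omega), List.getD_cons_zero,
      List.getD_eq_getElem _ _ (by omega)]
  have hget0 : PySem.List.pyGetD (List.replicate t (0 : Int) ++ X :: dr) ((t : Int)) 0 = X := by
    rw [PySem.List.pyGetD_natCast]
    rw [List.getD_append_right _ _ _ _ (by simp), List.length_replicate, Nat.sub_self,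
      List.getD_cons_zero]
  rw [hget1, hget0]
  rw [pv_pySetD_natCast _ _ _ (by simp [hdrdef])]
  rw [List.set_append_right _ _ (by simp), List.length_replicate, Nat.sub_self, List.set_cons_zero]
  have hfin : max (l.getD (t + 1) 0) X = l.getD t 0 := by
    rw [hXdef, hpdef, hvdef, hldef]
    exact (pvSuf_getD qs t (by omega) hp).symm
  rw [hfin]
  congr 1
  rw [hdrdef, List.getD_eq_getElem _ _ (by omega), ← List.drop_eq_getElem_cons (by omega)]

theorem pvA_loop (qs : List (List Int))
    (hp : ∀ t' : Nat, t' + 1 < qs.length → 0 ≤ (qs.getD t' []).getD 1 0) :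
    ∀ t : Nat, t + 1 ≤ qs.length →
    (PySem.List.pyRange ((t : Int) - 1) (-1) (-1)).foldl (pvAStep qs)
        (List.replicate t (0 : Int) ++ (pvSuf qs).drop t) = pvSuf qs := by
  intro t
  induction t with
  | zero =>
    intro _
    rw [show ((0 : Nat) : Int) - 1 = (-1 : Int) by norm_num]
    rw [PySem.List.pyRange_neg_one_eq_nil (le_refl _)]
    simp
  | succ t ih =>
    intro h
    rw [show (((t + 1 : Nat)) : Int) - 1 = (t : Int) by push_cast; ring]
    rw [PySem.List.pyRange_neg_one_cons (by omega)]
    rw [List.foldl_cons]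
    rw [pvAStep_inv qs hp t (by omega)]
    exact ih (by omega)

theorem pvA_defeq (qs : List (List Int)) :
    mostPoints qs =
      (PySem.List.max?
        ((PySem.List.pyRange ((qs.length : Int) - 2) (-1) (-1)).foldl (pvAStep qs)
          (PySem.List.pySetD (List.replicate qs.length (0 : Int)) (-1)
            (PySem.List.pyGetD (PySem.List.pyGetD qs (-1) []) 0 0)))
        (fun y => y)).getD 0 := rfl

theorem pvA_eq_suf (qs : List (List Int)) (h : qs ≠ [])
    (hp : ∀ t' : Nat, t' + 1 < qs.length → 0 ≤ (qs.getD t' []).getD 1 0) :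
    mostPoints qs = (pvSuf qs).getD 0 0 := by
  have hn : 0 < qs.length := List.length_pos_of_ne_nil h
  have hl : (pvSuf qs).length = qs.length := pvSuf_length qs
  rw [pvA_defeq]
  rw [PySem.List.pyGetD_neg_one _ _ h, PySem.List.pyGetD_zero]
  rw [pv_pySetD_neg_one _ _ (by simp; omega)]
  have hinit : (List.replicate qs.length (0 : Int)).set
        ((List.replicate qs.length (0 : Int)).length - 1) ((qs.getLast h).getD 0 0)
      = List.replicate (qs.length - 1) (0 : Int) ++ (pvSuf qs).drop (qs.length - 1) := by
    rw [pvSuf_last qs h, List.length_replicate]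
    rw [show qs.length = (qs.length - 1) + 1 from by omega, List.replicate_succ']
    rw [List.set_append_right _ _ (by simp), List.length_replicate, Nat.add_sub_cancel,
      Nat.sub_self, List.set_cons_zero]
  rw [hinit]
  rw [show (qs.length : Int) - 2 = ((qs.length - 1 : Nat) : Int) - 1 from by omega]
  rw [pvA_loop qs hp (qs.length - 1) (by omega)]
  cases hsuf : pvSuf qs with
  | nil => rw [hsuf] at hl; simp at hl; omega
  | cons x tl =>
    rw [PySem.List.max?_id_cons, Option.getD_some, List.getD_cons_zero]
    apply pv_foldl_max_of_le
    intro y hy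
    obtain ⟨j, hj, hje⟩ := List.mem_iff_getElem.mp hy
    have h0 : (pvSuf qs).getD 0 0 = x := by rw [hsuf]; rfl
    have hy2 : (pvSuf qs).getD (j + 1) 0 = y := by
      rw [hsuf, List.getD_cons_succ, List.getD_eq_getElem _ _ hj, hje]
    rw [← hje]
    calc tl[j] = (pvSuf qs).getD (j + 1) 0 := by rw [hy2, hje]
      _ ≤ (pvSuf qs).getD 0 0 := by
          apply pvSuf_le_head qs hp
          rw [hsuf] at hl; simp at hl; omega
      _ = x := h0

-- ============ B side: forward push DP over the prefix ============

def pvGStep (n : Int) (s : List Int × Option Int) (iq : Int × List Int) :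
    List Int × Option Int :=
  let val := PySem.List.pyGetD iq.2 0 0
  let power := PySem.List.pyGetD iq.2 1 0
  let nxt := iq.1 + power + 1
  if n ≤ nxt then
    let cand := PySem.List.pyGetD s.1 iq.1 0 + val
    let best : Option Int := match s.2 with
      | none => some cand
      | some b => some (max b cand)
    (PySem.List.pySetD s.1 (iq.1 + 1)
      (max (PySem.List.pyGetD s.1 (iq.1 + 1) 0) (PySem.List.pyGetD s.1 iq.1 0)), best)
  else
    let dp := PySem.List.pySetD s.1 nxt
      (max (PySem.List.pyGetD s.1 nxt 0) (PySem.List.pyGetD s.1 iq.1 0 + val))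
    (PySem.List.pySetD dp (iq.1 + 1)
      (max (PySem.List.pyGetD dp (iq.1 + 1) 0) (PySem.List.pyGetD dp iq.1 0)), s.2)

theorem pvB_defeq (qs : List (List Int)) :
    mostPoints_alt qs =
      (match ((PySem.List.enumerate (PySem.List.slice qs none (some (-1)))).foldl
          (pvGStep (qs.length : Int))
          (List.replicate qs.length (0 : Int), (none : Option Int))).2 with
       | none =>
          PySem.List.pyGetD ((PySem.List.enumerate (PySem.List.slice qs none (some (-1)))).foldl
            (pvGStep (qs.length : Int))
            (List.replicate qs.length (0 : Int), (none : Option Int))).1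
            ((qs.length : Int) - 1) 0 +
          PySem.List.pyGetD (PySem.List.pyGetD qs (-1) []) 0 0
       | some b => max b
          (PySem.List.pyGetD ((PySem.List.enumerate (PySem.List.slice qs none (some (-1)))).foldl
            (pvGStep (qs.length : Int))
            (List.replicate qs.length (0 : Int), (none : Option Int))).1
            ((qs.length : Int) - 1) 0 +
          PySem.List.pyGetD (PySem.List.pyGetD qs (-1) []) 0 0)) := rfl

theorem pv_getD_set (l : List Int) (i j : Nat) (v : Int) :
    (l.set i v).getD j 0 = if i = j ∧ i < l.length then v else l.getD j 0 := by
  rcases Nat.lt_or_ge j l.length with hj | hj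
  · rw [List.getD_eq_getElem _ _ (by simpa using hj), List.getD_eq_getElem _ _ hj,
      List.getElem_set]
    by_cases h : i = j
    · rw [if_pos h, if_pos ⟨h, by omega⟩]
    · rw [if_neg h, if_neg (fun hc => h hc.1)]
  · rw [List.getD_eq_default _ _ (by simpa using hj), List.getD_eq_default _ _ hj]
    split_ifs with h1
    · omega
    · rfl

theorem pv_getD_replicate (m j : Nat) : (List.replicate m (0 : Int)).getD j 0 = 0 := by
  rcases Nat.lt_or_ge j m with hj | hj
  · rw [List.getD_eq_getElem _ _ (by simpa using hj)]
    simp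
  · rw [List.getD_eq_default _ _ (by simpa using hj)]

theorem pvF_beyond (qs : List (List Int)) (j : Nat) (hj : qs.length ≤ j) :
    (pvSuf qs).getD j 0 = 0 := by
  rw [List.getD_eq_default]
  rw [pvSuf_length]; exact hj

-- Uniform recurrence for the suffix optimum at a non-last index, with out-of-range
-- continuation reads giving 0.
theorem pvF_rec (qs : List (List Int))
    (hp : ∀ t' : Nat, t' + 1 < qs.length → 0 ≤ (qs.getD t' []).getD 1 0)
    (i : Nat) (hi : i + 1 < qs.length) :
    (pvSuf qs).getD i 0 =
      max ((pvSuf qs).getD (i + 1) 0)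
        ((qs.getD i []).getD 0 0 +
          (pvSuf qs).getD (i + ((qs.getD i []).getD 1 0).toNat + 1) 0) := by
  have hbp : 0 ≤ (qs.getD i []).getD 1 0 := hp i hi
  rw [pvSuf_getD qs i hi hp]
  congr 1
  by_cases hc : (i : Int) + (qs.getD i []).getD 1 0 + 1 < (qs.length : Int)
  · rw [if_pos hc, Int.add_comm]
  · rw [if_neg hc, pvF_beyond qs _ (by omega), Int.add_zero]

theorem pvF_last (qs : List (List Int)) (h : qs ≠ []) :
    (pvSuf qs).getD (qs.length - 1) 0 = (qs.getLast h).getD 0 0 := by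
  have hn : 0 < qs.length := List.length_pos_of_ne_nil h
  have hl : (pvSuf qs).length = qs.length := pvSuf_length qs
  have hdrop := pvSuf_last qs h
  rw [List.getD_eq_getElem _ _ (by omega)]
  have h2 : ((pvSuf qs).drop (qs.length - 1)).getD 0 0 = (qs.getLast h).getD 0 0 := by
    rw [hdrop]; rfl
  rw [← h2, List.getD_eq_getElem _ _ (by simp; omega), List.getElem_drop]
  simp

-- The forward-DP invariant: every open state plus its suffix optimum, and every closed
-- schedule in the running best, is bounded by the answer (pvU2); the bound is attained at
-- a live state or at a closed schedule (pvE2).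
def pvU2 (qs : List (List Int)) (i : Nat) (dp : List Int) (b : Option Int) : Prop :=
  (∀ j : Nat, i ≤ j → j < qs.length →
    dp.getD j 0 + (pvSuf qs).getD j 0 ≤ (pvSuf qs).getD 0 0) ∧
  (∀ x : Int, b = some x → x ≤ (pvSuf qs).getD 0 0)

def pvE2 (qs : List (List Int)) (i : Nat) (dp : List Int) (b : Option Int) : Prop :=
  (∃ j : Nat, i ≤ j ∧ j < qs.length ∧
    (pvSuf qs).getD 0 0 ≤ dp.getD j 0 + (pvSuf qs).getD j 0) ∨
  (∃ x : Int, b = some x ∧ (pvSuf qs).getD 0 0 ≤ x)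

theorem pvGStep_inv (qs : List (List Int))
    (hp : ∀ t' : Nat, t' + 1 < qs.length → 0 ≤ (qs.getD t' []).getD 1 0)
    (i : Nat) (hi : i + 1 < qs.length) (dp : List Int) (b : Option Int)
    (hlen : dp.length = qs.length) (hU : pvU2 qs i dp b) (hE : pvE2 qs i dp b) :
    (pvGStep (qs.length : Int) (dp, b) ((i : Int), qs.getD i [])).1.length = qs.length ∧
    pvU2 qs (i + 1) (pvGStep (qs.length : Int) (dp, b) ((i : Int), qs.getD i [])).1
      (pvGStep (qs.length : Int) (dp, b) ((i : Int), qs.getD i [])).2 ∧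
    pvE2 qs (i + 1) (pvGStep (qs.length : Int) (dp, b) ((i : Int), qs.getD i [])).1
      (pvGStep (qs.length : Int) (dp, b) ((i : Int), qs.getD i [])).2 := by
  have hbp : 0 ≤ (qs.getD i []).getD 1 0 := hp i hi
  set val := (qs.getD i []).getD 0 0 with hval
  set p := (qs.getD i []).getD 1 0 with hpw
  have hrec := pvF_rec qs hp i hi
  rw [← hval, ← hpw] at hrec
  have hUi : dp.getD i 0 + (pvSuf qs).getD i 0 ≤ (pvSuf qs).getD 0 0 :=
    hU.1 i (le_refl _) (by omega)
  have hUi1 : dp.getD (i + 1) 0 + (pvSuf qs).getD (i + 1) 0 ≤ (pvSuf qs).getD 0 0 :=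
    hU.1 (i + 1) (by omega) (by omega)
  by_cases hcond : (qs.length : Int) ≤ (i : Int) + p + 1
  · -- terminal branch: the cooldown jumps past the end
    have hbeyond : (pvSuf qs).getD (i + p.toNat + 1) 0 = 0 := pvF_beyond qs _ (by omega)
    have hstep : pvGStep (qs.length : Int) (dp, b) ((i : Int), qs.getD i []) =
        (dp.set (i + 1) (max (dp.getD (i + 1) 0) (dp.getD i 0)),
          (match b with
            | none => some (dp.getD i 0 + val)
            | some x => some (max x (dp.getD i 0 + val)))) := by
      simp only [pvGStep, PySem.List.pyGetD_ofNat']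
      rw [if_pos hcond]
      rw [show (i : Int) + 1 = ((i + 1 : Nat) : Int) from by push_cast; ring,
        PySem.List.pyGetD_natCast, PySem.List.pyGetD_natCast,
        pv_pySetD_natCast _ _ _ (by omega)]
      cases b <;> rfl
    rw [hstep]
    dsimp only
    have hget : ∀ j : Nat,
        (dp.set (i + 1) (max (dp.getD (i + 1) 0) (dp.getD i 0))).getD j 0 =
          if i + 1 = j then max (dp.getD (i + 1) 0) (dp.getD i 0) else dp.getD j 0 := by
      intro j
      rw [pv_getD_set]
      by_cases h : i + 1 = j
      · rw [if_pos ⟨h, by omega⟩, if_pos h]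
      · rw [if_neg (fun hc => h hc.1), if_neg h]
    refine ⟨by simp [hlen], ⟨?_, ?_⟩, ?_⟩
    · intro j hj hjn
      rw [hget j]
      split_ifs with h1
      · subst h1
        omega
      · exact hU.1 j (by omega) hjn
    · intro x hx
      cases b with
      | none =>
        simp only [Option.some.injEq] at hx
        omega
      | some x0 =>
        simp only [Option.some.injEq] at hx
        have := hU.2 x0 rfl
        omega
    · rcases hE with ⟨j, hji, hjn, hEj⟩ | ⟨x0, hx0, hEx⟩
      · rcases Nat.lt_or_ge i j with hgt | hle
        · refine Or.inl ⟨j, by omega, hjn, ?_⟩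
          rw [hget j]
          split_ifs with h1
          · subst h1
            omega
          · exact hEj
        · have hje : j = i := by omega
          subst hje
          rw [hrec] at hEj
          by_cases hc : (pvSuf qs).getD 0 0 ≤ dp.getD j 0 + (pvSuf qs).getD (j + 1) 0
          · refine Or.inl ⟨j + 1, le_refl _, by omega, ?_⟩
            rw [hget (j + 1), if_pos rfl]
            omega
          · refine Or.inr ?_
            cases b with
            | none => exact ⟨dp.getD j 0 + val, rfl, by omega⟩
            | some x0 => exact ⟨max x0 (dp.getD j 0 + val), rfl, by omega⟩
      · refine Or.inr ?_
        cases b with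
        | none => simp at hx0
        | some x1 =>
          have hx1 : x1 = x0 := by simpa using hx0
          exact ⟨max x1 (dp.getD i 0 + val), rfl, by omega⟩
  · -- push branch: the score flows forward to the landing question
    set j0 : Nat := i + p.toNat + 1 with hj0
    have hj0n : j0 < qs.length := by omega
    have hstep : pvGStep (qs.length : Int) (dp, b) ((i : Int), qs.getD i []) =
        ((dp.set j0 (max (dp.getD j0 0) (dp.getD i 0 + val))).set (i + 1)
          (max ((dp.set j0 (max (dp.getD j0 0) (dp.getD i 0 + val))).getD (i + 1) 0)
            ((dp.set j0 (max (dp.getD j0 0) (dp.getD i 0 + val))).getD i 0)), b) := by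
      simp only [pvGStep, PySem.List.pyGetD_ofNat']
      rw [if_neg hcond]
      have hnxt : (i : Int) + p + 1 = ((j0 : Nat) : Int) := by rw [hj0]; push_cast; omega
      rw [hnxt, PySem.List.pyGetD_natCast, PySem.List.pyGetD_natCast,
        pv_pySetD_natCast _ _ _ (by omega)]
      rw [show (i : Int) + 1 = ((i + 1 : Nat) : Int) from by push_cast; ring,
        PySem.List.pyGetD_natCast, PySem.List.pyGetD_natCast,
        pv_pySetD_natCast _ _ _ (by simp [hlen]; omega)]
    rw [hstep]
    dsimp only
    set dp1 := dp.set j0 (max (dp.getD j0 0) (dp.getD i 0 + val)) with hdp1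
    set dp2 := dp1.set (i + 1) (max (dp1.getD (i + 1) 0) (dp1.getD i 0)) with hdp2
    have hlen1 : dp1.length = qs.length := by rw [hdp1, List.length_set, hlen]
    have hlen2 : dp2.length = qs.length := by rw [hdp2, List.length_set, hlen1]
    have hdp1get : ∀ j : Nat, dp1.getD j 0 =
        if j0 = j then max (dp.getD j0 0) (dp.getD i 0 + val) else dp.getD j 0 := by
      intro j
      rw [hdp1, pv_getD_set]
      by_cases h : j0 = j
      · rw [if_pos ⟨h, by omega⟩, if_pos h]
      · rw [if_neg (fun hc => h hc.1), if_neg h]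
    have hdp2get : ∀ j : Nat, dp2.getD j 0 =
        if i + 1 = j then max (dp1.getD (i + 1) 0) (dp1.getD i 0) else dp1.getD j 0 := by
      intro j
      rw [hdp2, pv_getD_set]
      by_cases h : i + 1 = j
      · rw [if_pos ⟨h, by omega⟩, if_pos h]
      · rw [if_neg (fun hc => h hc.1), if_neg h]
    have hdp1i : dp1.getD i 0 = dp.getD i 0 := by
      rw [hdp1get i, if_neg (by omega)]
    have hUj0 : dp.getD j0 0 + (pvSuf qs).getD j0 0 ≤ (pvSuf qs).getD 0 0 :=
      hU.1 j0 (by omega) hj0n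
    refine ⟨hlen2, ⟨?_, hU.2⟩, ?_⟩
    · intro j hj hjn
      have hUj : dp.getD j 0 + (pvSuf qs).getD j 0 ≤ (pvSuf qs).getD 0 0 :=
        hU.1 j (by omega) hjn
      rw [hdp2get j]
      split_ifs with h1
      · rw [← h1]
        rw [hdp1get (i + 1), hdp1i]
        split_ifs with h2
        · have h2' : dp.getD j0 0 = dp.getD (i + 1) 0 := by rw [h2]
          have hFe : (pvSuf qs).getD j0 0 = (pvSuf qs).getD (i + 1) 0 := by rw [h2]
          omega
        · omega
      · rw [hdp1get j]
        split_ifs with h2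
        · rw [← h2]
          omega
        · exact hUj
    · rcases hE with ⟨j, hji, hjn, hEj⟩ | hEb
      · rcases Nat.lt_or_ge i j with hgt | hle
        · refine Or.inl ⟨j, by omega, hjn, ?_⟩
          have h1 : dp.getD j 0 ≤ dp1.getD j 0 := by
            rw [hdp1get j]
            split_ifs with h
            · rw [← h]; exact le_max_left _ _
            · exact le_refl _
          have h2 : dp1.getD j 0 ≤ dp2.getD j 0 := by
            rw [hdp2get j]
            split_ifs with h
            · rw [← h]; exact le_max_left _ _
            · exact le_refl _
          omega
        · have hje : j = i := by omega
          subst hje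
          rw [hrec] at hEj
          by_cases hc : (pvSuf qs).getD 0 0 ≤ dp.getD j 0 + (pvSuf qs).getD (j + 1) 0
          · refine Or.inl ⟨j + 1, le_refl _, by omega, ?_⟩
            have h2 : dp.getD j 0 ≤ dp2.getD (j + 1) 0 := by
              rw [hdp2get (j + 1), if_pos rfl, hdp1i]
              exact le_max_right _ _
            omega
          · refine Or.inl ⟨j0, by omega, hj0n, ?_⟩
            have h1 : dp.getD j 0 + val ≤ dp1.getD j0 0 := by
              rw [hdp1get j0, if_pos rfl]
              exact le_max_right _ _
            have h2 : dp1.getD j0 0 ≤ dp2.getD j0 0 := by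
              rw [hdp2get j0]
              split_ifs with h
              · rw [← h]; exact le_max_left _ _
              · exact le_refl _
            omega
      · exact Or.inr hEb

theorem pvG_loop (qs : List (List Int))
    (hp : ∀ t' : Nat, t' + 1 < qs.length → 0 ≤ (qs.getD t' []).getD 1 0) :
    ∀ (l : List (List Int)) (i : Nat) (dp : List Int) (b : Option Int),
      i + l.length + 1 = qs.length →
      (∀ k : Nat, k < l.length → l.getD k [] = qs.getD (i + k) []) →
      dp.length = qs.length → pvU2 qs i dp b → pvE2 qs i dp b →
      ((PySem.List.enumerate l (i : Int)).foldl (pvGStep (qs.length : Int)) (dp, b)).1.length = qs.length ∧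
      pvU2 qs (qs.length - 1)
        ((PySem.List.enumerate l (i : Int)).foldl (pvGStep (qs.length : Int)) (dp, b)).1
        ((PySem.List.enumerate l (i : Int)).foldl (pvGStep (qs.length : Int)) (dp, b)).2 ∧
      pvE2 qs (qs.length - 1)
        ((PySem.List.enumerate l (i : Int)).foldl (pvGStep (qs.length : Int)) (dp, b)).1
        ((PySem.List.enumerate l (i : Int)).foldl (pvGStep (qs.length : Int)) (dp, b)).2 := by
  intro l
  induction l with
  | nil =>
    intro i dp b hlen _ hdl hU hE
    simp only [PySem.List.enumerate_nil, List.foldl_nil]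
    have : i = qs.length - 1 := by simp at hlen; omega
    subst this
    exact ⟨hdl, hU, hE⟩
  | cons q t ih =>
    intro i dp b hlen hk hdl hU hE
    have hi : i + 1 < qs.length := by simp at hlen; omega
    have hq : q = qs.getD i [] := by
      have := hk 0 (by simp)
      simpa using this
    rw [PySem.List.enumerate_cons, List.foldl_cons]
    have hstep := pvGStep_inv qs hp i hi dp b hdl hU hE
    rw [← hq] at hstep
    have hcast : (i : Int) + 1 = ((i + 1 : Nat) : Int) := by push_cast; ring
    rw [hcast]
    have hpair : pvGStep (qs.length : Int) (dp, b) ((i : Int), q) =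
        ((pvGStep (qs.length : Int) (dp, b) ((i : Int), q)).1,
         (pvGStep (qs.length : Int) (dp, b) ((i : Int), q)).2) := rfl
    rw [hpair]
    exact ih (i + 1) _ _ (by simp at hlen ⊢; omega)
      (fun k hk' => by
        have := hk (k + 1) (by simp; omega)
        simpa [Nat.add_assoc, Nat.add_comm 1 k] using this)
      hstep.1 hstep.2.1 hstep.2.2

theorem pvB_eq_suf (qs : List (List Int)) (h : qs ≠ [])
    (hp : ∀ t' : Nat, t' + 1 < qs.length → 0 ≤ (qs.getD t' []).getD 1 0) :
    mostPoints_alt qs = (pvSuf qs).getD 0 0 := by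
  have hn : 0 < qs.length := List.length_pos_of_ne_nil h
  have hU0 : pvU2 qs 0 (List.replicate qs.length (0 : Int)) none := by
    refine ⟨?_, by intro x hx; simp at hx⟩
    intro j _ hjn
    rw [pv_getD_replicate, Int.zero_add]
    exact pvSuf_le_head qs hp j hjn
  have hE0 : pvE2 qs 0 (List.replicate qs.length (0 : Int)) none := by
    refine Or.inl ⟨0, le_refl _, by omega, ?_⟩
    rw [pv_getD_replicate, Int.zero_add]
  have henum : PySem.List.enumerate qs.dropLast =
      PySem.List.enumerate qs.dropLast ((0 : Nat) : Int) := by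
    norm_num
  rw [pvB_defeq, PySem.List.slice_to_neg_one, henum]
  obtain ⟨hrl, hrU, hrE⟩ := pvG_loop qs hp qs.dropLast 0 (List.replicate qs.length 0) none
    (by simp [List.length_dropLast]; omega)
    (fun k hk => by
      rw [Nat.zero_add, List.getD_eq_getElem _ _ hk,
        List.getD_eq_getElem _ _ (by simp at hk; omega), List.getElem_dropLast])
    (by simp) hU0 hE0
  set s := (PySem.List.enumerate qs.dropLast ((0 : Nat) : Int)).foldl
    (pvGStep (qs.length : Int)) (List.replicate qs.length 0, (none : Option Int)) with hs
  have hcast : (qs.length : Int) - 1 = ((qs.length - 1 : Nat) : Int) := by omega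
  have hFl : (pvSuf qs).getD (qs.length - 1) 0 = (qs.getLast h).getD 0 0 := pvF_last qs h
  have hU1 := hrU.1 (qs.length - 1) (le_refl _) (by omega)
  have hcand : PySem.List.pyGetD s.1 ((qs.length : Int) - 1) 0 +
      PySem.List.pyGetD (PySem.List.pyGetD qs (-1) []) 0 0 =
      s.1.getD (qs.length - 1) 0 + (qs.getLast h).getD 0 0 := by
    rw [hcast, PySem.List.pyGetD_natCast, PySem.List.pyGetD_neg_one qs [] h,
      PySem.List.pyGetD_zero]
  cases hsb : s.2 with
  | none =>
    dsimp only
    rw [hcand]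
    rcases hrE with ⟨j, hji, hjn, hEj⟩ | ⟨x, hx, _⟩
    · have hje : j = qs.length - 1 := by omega
      subst hje
      omega
    · rw [hsb] at hx; simp at hx
  | some x =>
    dsimp only
    rw [hcand]
    have hbx := hrU.2 x hsb
    rcases hrE with ⟨j, hji, hjn, hEj⟩ | ⟨x0, hx0, hEx⟩
    · have hje : j = qs.length - 1 := by omega
      subst hje
      refine le_antisymm (max_le hbx (by omega)) (le_trans (by omega) (le_max_right _ _))
    · have hxx : x0 = x := by rw [hsb] at hx0; simpa using hx0.symm
      subst hxx
      refine le_antisymm (max_le hbx (by omega)) (le_trans hEx (le_max_left _ _))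

-- ===== VERDICT (by name: the statement is the Claim_ definition above) =====
theorem mostPoints_spec : Claim_equal_mostPoints := by
  intro qs _ hpre
  obtain ⟨h, _, hall⟩ := hpre
  have hp : ∀ t' : Nat, t' + 1 < qs.length → 0 ≤ (qs.getD t' []).getD 1 0 := by
    intro t' ht'
    have hmem : qs.getD t' [] ∈ qs.dropLast := by
      rw [List.getD_eq_getElem _ _ (by omega)]
      rw [← List.getElem_dropLast (xs := qs) (i := t') (by simp; omega)]
      exact List.getElem_mem _
    exact (hall _ hmem).2
  unfold Spec_mostPoints
  rw [pvA_eq_suf qs h hp, pvB_eq_suf qs h hp]
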